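-- pv_equiv track=rewrite | github.com/philnach/HOBL | ScenarioMaker/actions.py | int32_to_id
-- ===== SOURCE A (Python) =====
-- def int32_to_id(n):
--     if n==0: return "0"
--     chars="0123456789ACEFHJKLMNPRTUVWXY"
--     length=len(chars)
--     result=""
--     remain=n
--     while remain>0:
--         pos = remain % length
--         remain = remain // length
--         result = chars[pos] + result
--     return result
-- ===== SOURCE B (Python) =====
-- def int32_to_id(n):
--     if n <= 0:
--         return "0" if n == 0 else ""
--     chars = "0123456789ACEFHJKLMNPRTUVWXY"
--     p = 1
--     while p * 28 <= n:
--         p *= 28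
--     out = []
--     while p > 0:
--         out.append(chars[(n // p) % 28])
--         p //= 28
--     return "".join(out)
-- ===== Notes on version B (the rewrite author's own statement) =====
-- stated objective: alternative
-- what changed: Instead of extracting digits least-significant-first and prepending them to a string, B first finds the highest power of 28 not exceeding n, then emits digits most-significant-first as (n // p) % 28 while dividing the power down.
import Mathlib
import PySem

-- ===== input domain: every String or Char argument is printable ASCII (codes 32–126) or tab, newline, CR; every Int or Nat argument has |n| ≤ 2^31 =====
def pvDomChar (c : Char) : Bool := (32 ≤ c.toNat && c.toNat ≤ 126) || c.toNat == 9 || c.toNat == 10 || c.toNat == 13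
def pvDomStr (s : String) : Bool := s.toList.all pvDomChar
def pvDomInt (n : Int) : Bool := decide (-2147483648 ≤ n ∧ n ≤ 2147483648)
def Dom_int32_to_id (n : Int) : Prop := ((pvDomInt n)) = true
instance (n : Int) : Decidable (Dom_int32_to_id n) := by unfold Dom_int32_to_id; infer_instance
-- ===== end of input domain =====

-- B replaces A's least-significant-first digit-prepending loop with a most-significant-first
-- emission driven by the largest power of 28 ≤ n; same return values.

-- ===== PORT A =====
def idChars : List Char := "0123456789ACEFHJKLMNPRTUVWXY".toList

-- A's while loop: prepend chars[remain % 28] and floor-divide, while remain > 0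
def int32_to_id_loop (remain : Int) (result : List Char) : List Char :=
  if 0 < remain then
    int32_to_id_loop (PySem.Int.floordiv remain (idChars.length : Int))
      (((PySem.List.pyGet? idChars (PySem.Int.mod remain (idChars.length : Int))).getD ' ') :: result)
  else result
termination_by remain.toNat
decreasing_by
  have h28 : (idChars.length : Int) = 28 := by decide
  rw [h28, PySem.Int.floordiv_eq_ediv_of_pos (by norm_num)]
  omega

def int32_to_id (n : Int) : String :=
  if n == 0 then "0" else String.ofList (int32_to_id_loop n [])

-- ===== PORT B =====
-- B's first loop: raise p to the largest power of 28 with p ≤ n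
-- (the '0 < p' conjunct only makes the recursion total; B reaches it with p = 1 only)
def int32_to_id_findP (n p : Int) : Int :=
  if 0 < p ∧ p * 28 ≤ n then int32_to_id_findP n (p * 28) else p
termination_by (n - p).toNat
decreasing_by omega

-- B's second loop: emit chars[(n // p) % 28] for p, p/28, …, 1
def int32_to_id_emit (n p : Int) : List Char :=
  if 0 < p then
    ((PySem.List.pyGet? idChars (PySem.Int.mod (PySem.Int.floordiv n p) 28)).getD ' ')
      :: int32_to_id_emit n (PySem.Int.floordiv p 28)
  else []
termination_by p.toNat
decreasing_by
  rw [PySem.Int.floordiv_eq_ediv_of_pos (by norm_num)]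
  omega

def int32_to_id_alt (n : Int) : String :=
  if n ≤ 0 then (if n == 0 then "0" else "")
  else String.ofList (int32_to_id_emit n (int32_to_id_findP n 1))

-- ===== PRECONDITION & SPEC =====
def Spec_int32_to_id (n : Int) (out : String) : Prop := out = int32_to_id_alt n
instance (n : Int) (out : String) : Decidable (Spec_int32_to_id n out) := by unfold Spec_int32_to_id; infer_instance

-- ===== CLAIM =====
def Claim_equal_int32_to_id : Prop := ∀ (n : Int), Dom_int32_to_id n → Spec_int32_to_id n (int32_to_id n)

-- ===== LEMMAS AND PROOFS =====

-- reference digit list (proof-side only): base-28 digits of r, most significant first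
def digs (r : Int) : List Char :=
  if r ≤ 0 then []
  else digs (r / 28) ++ [(PySem.List.pyGet? idChars (r % 28)).getD ' ']
termination_by r.toNat
decreasing_by omega

theorem floordiv28 (a : Int) : PySem.Int.floordiv a 28 = a / 28 :=
  PySem.Int.floordiv_eq_ediv_of_pos (by norm_num)

theorem mod28 (a : Int) : PySem.Int.mod a 28 = a % 28 :=
  PySem.Int.mod_eq_emod_of_pos (by norm_num)

theorem len28 : (idChars.length : Int) = 28 := by decide

-- A's loop computes the reference digits followed by the accumulator
theorem loop_eq_digs (r : Int) (res : List Char) :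
    int32_to_id_loop r res = digs r ++ res := by
  induction r, res using int32_to_id_loop.induct_unfolding with
  | case1 r res h ih =>
    rw [len28, floordiv28, mod28] at ih ⊢
    rw [ih]
    conv_rhs => rw [digs]
    rw [if_neg (by omega : ¬ r ≤ 0)]
    simp
  | case2 r res h =>
    rw [digs, if_pos (by omega)]
    simp

-- findP starting from a power of 28 below n returns a power of 28 bracketing n
theorem findP_pow (n p : Int) :
    (∃ k : ℕ, p = 28 ^ k) → p ≤ n →
    ∃ m : ℕ, int32_to_id_findP n p = 28 ^ m ∧ (28:Int) ^ m ≤ n ∧ n < 28 ^ (m + 1) := by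
  induction p using int32_to_id_findP.induct_unfolding (n := n) with
  | case1 p h ih =>
    rintro ⟨k, rfl⟩ _
    exact ih ⟨k + 1, by ring⟩ h.2
  | case2 p h =>
    rintro ⟨k, rfl⟩ hle
    refine ⟨k, rfl, hle, ?_⟩
    have hpos : (0:Int) < 28 ^ k := by positivity
    have : ¬ (28:Int) ^ k * 28 ≤ n := fun hc => h ⟨hpos, hc⟩
    calc n < 28 ^ k * 28 := by omega
      _ = 28 ^ (k + 1) := by ring

theorem emit_pos (n p : Int) (h : 0 < p) :
    int32_to_id_emit n p =
      ((PySem.List.pyGet? idChars (PySem.Int.mod (PySem.Int.floordiv n p) 28)).getD ' ')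
        :: int32_to_id_emit n (PySem.Int.floordiv p 28) := by
  rw [int32_to_id_emit, if_pos h]

theorem emit_one (n : Int) :
    int32_to_id_emit n 1 = [(PySem.List.pyGet? idChars (n % 28)).getD ' '] := by
  rw [emit_pos n 1 one_pos]
  have h0 : PySem.Int.floordiv (1:Int) 28 = 0 := by decide
  have h1 : PySem.Int.floordiv n 1 = n := by
    rw [PySem.Int.floordiv_eq_ediv_of_pos one_pos, Int.ediv_one]
  rw [h0, h1, mod28, int32_to_id_emit, if_neg (lt_irrefl 0)]

-- shifting the power down one step peels the least-significant digit off the end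
theorem emit_shift (k : ℕ) (n : Int) :
    int32_to_id_emit n (28 ^ (k + 1)) =
      int32_to_id_emit (n / 28) (28 ^ k) ++ [(PySem.List.pyGet? idChars (n % 28)).getD ' '] := by
  induction k generalizing n with
  | zero =>
    simp only [zero_add, pow_one, pow_zero]
    rw [emit_pos n 28 (by norm_num)]
    have h28 : PySem.Int.floordiv (28:Int) 28 = 1 := by decide
    rw [h28, emit_one, emit_one, floordiv28, mod28]
    rfl
  | succ k ih =>
    rw [emit_pos n _ (by positivity), emit_pos (n / 28) _ (by positivity)]
    have hstep : PySem.Int.floordiv ((28:Int) ^ (k + 1 + 1)) 28 = 28 ^ (k + 1) := by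
      rw [floordiv28, show ((28:Int) ^ (k + 1 + 1)) = 28 ^ (k+1) * 28 by ring]
      exact Int.mul_ediv_cancel _ (by norm_num)
    have hstep' : PySem.Int.floordiv ((28:Int) ^ (k + 1)) 28 = 28 ^ k := by
      rw [floordiv28, show ((28:Int) ^ (k + 1)) = 28 ^ k * 28 by ring]
      exact Int.mul_ediv_cancel _ (by norm_num)
    rw [hstep, hstep', ih]
    have hhead : PySem.Int.floordiv (n / 28) (28 ^ (k + 1)) = PySem.Int.floordiv n (28 ^ (k + 1 + 1)) := by
      rw [PySem.Int.floordiv_eq_ediv_of_pos (by positivity),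
          PySem.Int.floordiv_eq_ediv_of_pos (by positivity),
          Int.ediv_ediv_of_nonneg, show (28:Int) * 28 ^ (k+1) = 28 ^ (k+1+1) by ring]
      norm_num
    rw [hhead]
    simp

-- with the bracketing power, the MSB-first emission equals the reference digits
theorem emit_eq_digs (k : ℕ) (n : Int) (h1 : (28:Int) ^ k ≤ n) (h2 : n < 28 ^ (k + 1)) :
    int32_to_id_emit n (28 ^ k) = digs n := by
  induction k generalizing n with
  | zero =>
    rw [pow_zero] at h1 ⊢
    rw [emit_one, digs, if_neg (by omega)]
    have hd : n / 28 = 0 := by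
      apply Int.ediv_eq_zero_of_lt (by omega)
      simpa using h2
    rw [hd, digs, if_pos le_rfl]
    simp
  | succ k ih =>
    rw [emit_shift]
    have hb1 : (28:Int) ^ k ≤ n / 28 := by
      apply Int.le_ediv_iff_mul_le (by norm_num) |>.mpr
      calc (28:Int) ^ k * 28 = 28 ^ (k + 1) := by ring
        _ ≤ n := h1
    have hb2 : n / 28 < 28 ^ (k + 1) := by
      apply Int.ediv_lt_iff_lt_mul (by norm_num) |>.mpr
      calc n < 28 ^ (k + 1 + 1) := h2
        _ = 28 ^ (k + 1) * 28 := by ring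
    rw [ih _ hb1 hb2]
    have hnpos : 0 < n := lt_of_lt_of_le (by positivity) h1
    conv_rhs => rw [digs]
    rw [if_neg (by omega : ¬ n ≤ 0)]

-- ===== VERDICT =====
theorem int32_to_id_spec : Claim_equal_int32_to_id := by
  intro n _
  unfold Spec_int32_to_id int32_to_id int32_to_id_alt
  by_cases h0 : n = 0
  · simp [h0]
  · by_cases hneg : n ≤ 0
    · rw [if_pos hneg]
      simp only [h0, beq_iff_eq, if_false]
      rw [int32_to_id_loop, if_neg (by omega)]
    · rw [if_neg hneg]
      simp only [h0, beq_iff_eq, if_false]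
      have hle : (1:Int) ≤ n := by omega
      obtain ⟨m, hfp, hm1, hm2⟩ := findP_pow n 1 ⟨0, by norm_num⟩ hle
      rw [loop_eq_digs, List.append_nil, hfp, emit_eq_digs m n hm1 hm2]
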